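-- pv_equiv track=rewrite | github.com/parthsharma1899/meta-openenv-hack | crispr_env/server/environment.py | find_pam_sites
-- ===== SOURCE A (Python) =====
-- from typing import Any, Dict, List, Optional
--
-- def find_pam_sites(sequence: str) -> List[int]:
--     """
--     Return positions of all NGG PAM sites on the forward strand.
--
--     Position i is a PAM site when sequence[i+1]=='G' and sequence[i+2]=='G'
--     (i.e., the NGG triplet starts at i, where N = sequence[i]).
--
--     Also scans the reverse-complement strand by looking for CCN (= NGG on
--     the minus strand) on the forward representation.
--     """
--     seq = sequence.upper()
--     sites: List[int] = []
--
--     # Forward strand: NGG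
--     for i in range(len(seq) - 2):
--         if seq[i + 1] == "G" and seq[i + 2] == "G":
--             sites.append(i)
--
--     # Reverse-complement strand: CCN on forward = NGG on minus strand
--     for i in range(len(seq) - 2):
--         if seq[i] == "C" and seq[i + 1] == "C":
--             sites.append(-(i + 2))   # negative index convention for minus strand
--
--     return sorted(set(sites))
-- ===== SOURCE B (Python) =====
-- def find_pam_sites(sequence):
--     # Run-length approach: decompose the sequence into maximal runs of equal
--     # characters; a run of G's of length L >= 2 contributes the forward sites
--     # as one arithmetic range, a run of C's contributes the reverse-strand
--     # sites as one range.  No per-window test and no sort.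
--     seq = sequence.upper()
--     n = len(seq)
--     fwd = []
--     rev = []
--     j = 0
--     while j < n:
--         c = seq[j]
--         k = j
--         while k < n and seq[k] == c:
--             k += 1
--         # maximal run seq[j:k] of the character c
--         if c == 'G':
--             # forward NGG sites: i with i+1, i+2 inside the run and i >= 0
--             fwd.extend(range(max(j - 1, 0), k - 2))
--         elif c == 'C':
--             # reverse-strand CCN sites: i with i, i+1 inside the run, i+2 < n
--             for i in range(j, min(k - 1, n - 2)):
--                 rev.append(-(i + 2))
--         j = k
--     rev.reverse()
--     return rev + fwd
-- ===== Notes on version B (the rewrite author's own statement) =====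
-- stated objective: faster
-- what changed: Run-length decomposition: B finds each maximal run of equal characters and emits that run's sites as one arithmetic range (forward half ascending, reverse-strand half reversed once), instead of A's per-window tests at every position followed by sorted(set(...)).
import Mathlib
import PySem

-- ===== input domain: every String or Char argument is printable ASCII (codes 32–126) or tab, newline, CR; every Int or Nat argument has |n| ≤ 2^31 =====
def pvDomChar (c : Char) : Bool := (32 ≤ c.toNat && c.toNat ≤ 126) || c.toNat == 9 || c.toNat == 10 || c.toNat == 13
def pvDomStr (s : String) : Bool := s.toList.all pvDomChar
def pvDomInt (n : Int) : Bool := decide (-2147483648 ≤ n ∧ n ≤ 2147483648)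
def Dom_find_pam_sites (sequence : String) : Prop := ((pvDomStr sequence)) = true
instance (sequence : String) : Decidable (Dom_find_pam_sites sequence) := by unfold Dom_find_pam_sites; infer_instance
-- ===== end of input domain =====

-- B replaces A's per-window scans + sorted(set(...)) by a run-length decomposition:
-- each maximal run of equal characters emits its sites as one arithmetic range, no sort.

-- ===== PORT A =====
-- indices i, i+1, i+2 are always in range for i in range(len(seq)-2), so pyGetD with a
-- dummy default is exact there
def find_pam_sites (sequence : String) : List Int :=
  let seq := (PySem.Str.upper sequence).toList
  let n : Int := (seq.length : Int)
  let sites : List Int := (PySem.List.pyRange 0 (n - 2)).foldl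
      (fun acc i => if (PySem.List.pyGetD seq (i+1) ' ' == 'G' && PySem.List.pyGetD seq (i+2) ' ' == 'G') then acc ++ [i] else acc) []
  let sites := (PySem.List.pyRange 0 (n - 2)).foldl
      (fun acc i => if (PySem.List.pyGetD seq i ' ' == 'C' && PySem.List.pyGetD seq (i+1) ' ' == 'C') then acc ++ [-(i+2)] else acc) sites
  PySem.List.sorted (PySem.Set.ofList sites) (fun x => x)

-- ===== PORT B =====
-- inner while loop of Source B: first index k' ≥ k with seq[k'] ≠ c (or len(seq))
def pvRunEnd (seq : List Char) (c : Char) (k : Nat) : Nat :=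
  if h : k < seq.length then
    if seq[k] == c then pvRunEnd seq c (k+1) else k
  else k
termination_by seq.length - k

-- termination facts for the outer while loop (cited by pvRuns's decreasing_by)
theorem pv_le_runEnd (seq : List Char) (c : Char) (k : Nat) : k ≤ pvRunEnd seq c k := by
  unfold pvRunEnd
  split
  · split
    · have := pv_le_runEnd seq c (k+1); omega
    · exact le_refl _
  · exact le_refl _
termination_by seq.length - k

theorem pv_lt_runEnd (seq : List Char) (c : Char) (k : Nat) (h : k < seq.length)
    (hc : seq[k] = c) : k < pvRunEnd seq c k := by
  unfold pvRunEnd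
  rw [dif_pos h, if_pos (by simp [hc])]
  have := pv_le_runEnd seq c (k+1); omega

-- outer while loop of Source B, carrying (fwd, rev)
def pvRuns (seq : List Char) (j : Nat) (fwd rev : List Int) : List Int × List Int :=
  if h : j < seq.length then
    let c := seq[j]
    let k := pvRunEnd seq c j
    let fwd' := if c == 'G' then
        fwd ++ PySem.List.pyRange (max ((j : Int) - 1) 0) ((k : Int) - 2) else fwd
    let rev' := if c == 'G' then rev
      else if c == 'C' then
        (PySem.List.pyRange (j : Int) (min ((k : Int) - 1) ((seq.length : Int) - 2))).foldl
          (fun acc i => acc ++ [-(i+2)]) rev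
      else rev
    pvRuns seq k fwd' rev'
  else (fwd, rev)
termination_by seq.length - j
decreasing_by
  have := pv_lt_runEnd seq seq[j] j h rfl
  omega

def find_pam_sites_alt (sequence : String) : List Int :=
  let seq := (PySem.Str.upper sequence).toList
  let p := pvRuns seq 0 [] []
  p.2.reverse ++ p.1

-- ===== PRECONDITION & SPEC =====
def Spec_find_pam_sites (sequence : String) (out : List Int) : Prop := out = find_pam_sites_alt sequence
instance (sequence : String) (out : List Int) : Decidable (Spec_find_pam_sites sequence out) := by unfold Spec_find_pam_sites; infer_instance

-- ===== CLAIM (what is proved, stated in full; the proofs are below) =====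
def Claim_equal_find_pam_sites : Prop := ∀ (sequence : String), Dom_find_pam_sites sequence → Spec_find_pam_sites sequence (find_pam_sites sequence)

-- ===== LEMMAS AND PROOFS =====

-- further facts about the inner while loop
theorem pv_runEnd_le (seq : List Char) (c : Char) (k : Nat) (h : k ≤ seq.length) :
    pvRunEnd seq c k ≤ seq.length := by
  unfold pvRunEnd
  split
  · split
    · exact pv_runEnd_le seq c (k+1) (by omega)
    · exact h
  · exact h
termination_by seq.length - k

theorem pv_runEnd_run (seq : List Char) (c : Char) (k : Nat) :
    ∀ i, k ≤ i → i < pvRunEnd seq c k → seq[i]? = some c := by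
  intro i hki hik
  unfold pvRunEnd at hik
  by_cases h : k < seq.length
  · rw [dif_pos h] at hik
    by_cases hc : seq[k] = c
    · rw [if_pos (by simp [hc])] at hik
      rcases Nat.eq_or_lt_of_le hki with rfl | hlt
      · simp [List.getElem?_eq_getElem h, hc]
      · exact pv_runEnd_run seq c (k+1) i hlt hik
    · rw [if_neg (by simp [hc])] at hik; omega
  · rw [dif_neg h] at hik; omega
termination_by seq.length - k

theorem pv_runEnd_stop (seq : List Char) (c : Char) (k : Nat) :
    seq[pvRunEnd seq c k]? ≠ some c := by
  unfold pvRunEnd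
  by_cases h : k < seq.length
  · rw [dif_pos h]
    by_cases hc : seq[k] = c
    · rw [if_pos (by simp [hc])]; exact pv_runEnd_stop seq c (k+1)
    · rw [if_neg (by simp [hc])]
      simp [List.getElem?_eq_getElem h, hc]
  · rw [dif_neg h]
    have : seq[k]? = none := List.getElem?_eq_none_iff.mpr (by omega)
    simp [this]
termination_by seq.length - k

-- the two site predicates of A's scans
def pvPF (seq : List Char) (i : Int) : Bool :=
  PySem.List.pyGetD seq (i+1) ' ' == 'G' && PySem.List.pyGetD seq (i+2) ' ' == 'G'
def pvPR (seq : List Char) (i : Int) : Bool :=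
  PySem.List.pyGetD seq i ' ' == 'C' && PySem.List.pyGetD seq (i+1) ' ' == 'C'

-- the sites ≥ a boundary j (what remains for pvRuns to emit from position j on)
def pvF (seq : List Char) (j : Nat) : List Int :=
  (PySem.List.pyRange 0 ((seq.length : Int) - 2)).filter
    (fun i => pvPF seq i && decide ((j : Int) ≤ i + 1))
def pvRL (seq : List Char) (j : Nat) : List Int :=
  (PySem.List.pyRange 0 ((seq.length : Int) - 2)).filter
    (fun i => pvPR seq i && decide ((j : Int) ≤ i))

theorem pv_mem_pvF (seq : List Char) (j : Nat) (x : Int) :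
    x ∈ pvF seq j ↔ 0 ≤ x ∧ x < (seq.length : Int) - 2 ∧ pvPF seq x = true ∧ (j : Int) ≤ x + 1 := by
  simp [pvF, List.mem_filter, PySem.List.mem_pyRange_one, and_assoc]

theorem pv_mem_pvRL (seq : List Char) (j : Nat) (x : Int) :
    x ∈ pvRL seq j ↔ 0 ≤ x ∧ x < (seq.length : Int) - 2 ∧ pvPR seq x = true ∧ (j : Int) ≤ x := by
  simp [pvRL, List.mem_filter, PySem.List.mem_pyRange_one, and_assoc]

theorem pv_pvPF_iff (seq : List Char) (x : Int) (h0 : 0 ≤ x) (h2 : x < (seq.length : Int) - 2) :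
    pvPF seq x = true ↔ seq[(x+1).toNat]? = some 'G' ∧ seq[(x+2).toNat]? = some 'G' := by
  rw [pvPF, PySem.List.pyGetD_eq_getElem seq ' ' (by omega) (by omega),
      PySem.List.pyGetD_eq_getElem seq ' ' (by omega) (by omega)]
  simp [List.getElem?_eq_getElem (show (x+1).toNat < seq.length by omega),
        List.getElem?_eq_getElem (show (x+2).toNat < seq.length by omega)]

theorem pv_pvPR_iff (seq : List Char) (x : Int) (h0 : 0 ≤ x) (h2 : x < (seq.length : Int) - 2) :
    pvPR seq x = true ↔ seq[x.toNat]? = some 'C' ∧ seq[(x+1).toNat]? = some 'C' := by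
  rw [pvPR, PySem.List.pyGetD_eq_getElem seq ' ' (by omega) (by omega),
      PySem.List.pyGetD_eq_getElem seq ' ' (by omega) (by omega)]
  simp [List.getElem?_eq_getElem (show x.toNat < seq.length by omega),
        List.getElem?_eq_getElem (show (x+1).toNat < seq.length by omega)]

-- two strictly increasing integer lists with the same members are equal
theorem pv_ext {l1 l2 : List Int} (h1 : l1.Pairwise (· < ·)) (h2 : l2.Pairwise (· < ·))
    (hm : ∀ x, x ∈ l1 ↔ x ∈ l2) : l1 = l2 :=
  List.Perm.eq_of_pairwise (fun a b _ _ hab hba => absurd hba (not_lt_of_gt hab)) h1 h2 ((List.perm_ext_iff_of_nodup h1.nodup h2.nodup).mpr hm)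

-- splitting the remaining forward sites at a run [j, k) of the character c
theorem pv_pvF_split (seq : List Char) (c : Char) (j k : Nat)
    (hjk : j < k) (hkn : k ≤ seq.length)
    (hrun : ∀ i, j ≤ i → i < k → seq[i]? = some c)
    (hstop : seq[k]? ≠ some c) :
    pvF seq j = (if c == 'G' then PySem.List.pyRange (max ((j : Int) - 1) 0) ((k : Int) - 2) else []) ++ pvF seq k := by
  apply pv_ext
  · exact (PySem.List.pairwise_lt_pyRange_one 0 _).filter _
  · refine List.pairwise_append.mpr ⟨?_, (PySem.List.pairwise_lt_pyRange_one 0 _).filter _, ?_⟩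
    · split
      · exact PySem.List.pairwise_lt_pyRange_one _ _
      · exact List.Pairwise.nil
    · intro x hx y hy
      have hy' := (pv_mem_pvF seq k y).mp hy
      split at hx
      · have := PySem.List.mem_pyRange_one.mp hx; omega
      · simp at hx
  · intro x
    rw [pv_mem_pvF, List.mem_append, pv_mem_pvF]
    by_cases hc : c = 'G'
    · simp only [hc, beq_self_eq_true, if_true, PySem.List.mem_pyRange_one]
      constructor
      · rintro ⟨h0, hn, hpf, hj⟩
        rcases le_or_gt (k : Int) (x + 1) with hk | hk
        · exact Or.inr ⟨h0, hn, hpf, hk⟩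
        · left
          obtain ⟨hg1, hg2⟩ := (pv_pvPF_iff seq x h0 hn).mp hpf
          have hx2 : x + 2 < (k : Int) := by
            by_contra hge
            have hxk : (x + 2).toNat = k := by omega
            rw [hxk] at hg2; rw [hc] at hstop; exact hstop hg2
          omega
      · rintro (⟨hlo, hhi⟩ | ⟨h0, hn, hpf, hk⟩)
        · have h0 : 0 ≤ x := by omega
          have hn : x < (seq.length : Int) - 2 := by omega
          refine ⟨h0, hn, ?_, by omega⟩
          rw [pv_pvPF_iff seq x h0 hn, ← hc]
          exact ⟨hrun (x+1).toNat (by omega) (by omega),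
                 hrun (x+2).toNat (by omega) (by omega)⟩
        · exact ⟨h0, hn, hpf, by omega⟩
    · rw [if_neg (by simp [hc])]
      simp only [List.not_mem_nil, false_or]
      constructor
      · rintro ⟨h0, hn, hpf, hj⟩
        refine ⟨h0, hn, hpf, ?_⟩
        by_contra hk
        have hg1 := ((pv_pvPF_iff seq x h0 hn).mp hpf).1
        have := hrun (x+1).toNat (by omega) (by omega)
        rw [this] at hg1
        exact hc (by injection hg1)
      · rintro ⟨h0, hn, hpf, hk⟩
        exact ⟨h0, hn, hpf, by omega⟩

-- splitting the remaining reverse-strand sites at a run [j, k) of the character c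
theorem pv_pvRL_split (seq : List Char) (c : Char) (j k : Nat)
    (hjk : j < k) (hkn : k ≤ seq.length)
    (hrun : ∀ i, j ≤ i → i < k → seq[i]? = some c)
    (hstop : seq[k]? ≠ some c) :
    pvRL seq j = (if c == 'C' then PySem.List.pyRange (j : Int) (min ((k : Int) - 1) ((seq.length : Int) - 2)) else []) ++ pvRL seq k := by
  apply pv_ext
  · exact (PySem.List.pairwise_lt_pyRange_one 0 _).filter _
  · refine List.pairwise_append.mpr ⟨?_, (PySem.List.pairwise_lt_pyRange_one 0 _).filter _, ?_⟩
    · split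
      · exact PySem.List.pairwise_lt_pyRange_one _ _
      · exact List.Pairwise.nil
    · intro x hx y hy
      have hy' := (pv_mem_pvRL seq k y).mp hy
      split at hx
      · have := PySem.List.mem_pyRange_one.mp hx; omega
      · simp at hx
  · intro x
    rw [pv_mem_pvRL, List.mem_append, pv_mem_pvRL]
    by_cases hc : c = 'C'
    · simp only [hc, beq_self_eq_true, if_true, PySem.List.mem_pyRange_one]
      constructor
      · rintro ⟨h0, hn, hpr, hj⟩
        rcases le_or_gt (k : Int) x with hk | hk
        · exact Or.inr ⟨h0, hn, hpr, hk⟩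
        · left
          obtain ⟨hg1, hg2⟩ := (pv_pvPR_iff seq x h0 hn).mp hpr
          have hx1 : x + 1 < (k : Int) := by
            by_contra hge
            have hxk : (x + 1).toNat = k := by omega
            rw [hxk] at hg2; rw [hc] at hstop; exact hstop hg2
          omega
      · rintro (⟨hlo, hhi⟩ | ⟨h0, hn, hpr, hk⟩)
        · have h0 : 0 ≤ x := by omega
          have hn : x < (seq.length : Int) - 2 := by omega
          refine ⟨h0, hn, ?_, hlo⟩
          rw [pv_pvPR_iff seq x h0 hn, ← hc]
          exact ⟨hrun x.toNat (by omega) (by omega),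
                 hrun (x+1).toNat (by omega) (by omega)⟩
        · exact ⟨h0, hn, hpr, by omega⟩
    · rw [if_neg (by simp [hc])]
      simp only [List.not_mem_nil, false_or]
      constructor
      · rintro ⟨h0, hn, hpr, hj⟩
        refine ⟨h0, hn, hpr, ?_⟩
        by_contra hk
        have hg1 := ((pv_pvPR_iff seq x h0 hn).mp hpr).1
        have := hrun x.toNat (by omega) (by omega)
        rw [this] at hg1
        exact hc (by injection hg1)
      · rintro ⟨h0, hn, hpr, hk⟩
        exact ⟨h0, hn, hpr, by omega⟩

-- the outer loop emits exactly the sites with boundary ≥ j, in order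
theorem pv_pvRuns_spec (t : Nat) (seq : List Char) (j : Nat) (fwd rev : List Int)
    (ht : seq.length - j ≤ t) :
    pvRuns seq j fwd rev = (fwd ++ pvF seq j, rev ++ (pvRL seq j).map (fun i => -(i+2))) := by
  induction t generalizing j fwd rev with
  | zero =>
    have hj : seq.length ≤ j := by omega
    rw [pvRuns, dif_neg (by omega)]
    have hF : pvF seq j = [] := by
      rw [pvF, List.filter_eq_nil_iff]
      intro x hx
      have := PySem.List.mem_pyRange_one.mp hx
      simp only [Bool.and_eq_true, decide_eq_true_eq, not_and]
      intro _; omega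
    have hR : pvRL seq j = [] := by
      rw [pvRL, List.filter_eq_nil_iff]
      intro x hx
      have := PySem.List.mem_pyRange_one.mp hx
      simp only [Bool.and_eq_true, decide_eq_true_eq, not_and]
      intro _; omega
    simp [hF, hR]
  | succ t ih =>
    by_cases h : j < seq.length
    · rw [pvRuns, dif_pos h]
      set c := seq[j] with hcdef
      set k := pvRunEnd seq c j with hkdef
      have hjk : j < k := pv_lt_runEnd seq c j h rfl
      have hkn : k ≤ seq.length := pv_runEnd_le seq c j (by omega)
      have hrun := pv_runEnd_run seq c j
      have hstop := pv_runEnd_stop seq c j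
      rw [ih k _ _ (by omega)]
      rw [pv_pvF_split seq c j k hjk hkn (fun i h1 h2 => hrun i h1 h2) hstop,
          pv_pvRL_split seq c j k hjk hkn (fun i h1 h2 => hrun i h1 h2) hstop]
      simp only [List.map_append, PySem.List.foldl_append_singleton_eq_map, ← hkdef]
      by_cases hg : c = 'G'
      · have h1 : (c == 'G') = true := by rw [hg]; decide
        have h2 : (c == 'C') = false := by rw [hg]; decide
        simp [h1, h2, List.append_assoc]
      · have h1 : (c == 'G') = false := beq_eq_false_iff_ne.mpr hg
        by_cases hcc : c = 'C'
        · have h2 : (c == 'C') = true := by rw [hcc]; decide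
          simp [h1, h2, List.append_assoc]
        · have h2 : (c == 'C') = false := beq_eq_false_iff_ne.mpr hcc
          simp [h1, h2]
    · rw [pvRuns, dif_neg h]
      have hF : pvF seq j = [] := by
        rw [pvF, List.filter_eq_nil_iff]
        intro x hx
        have := PySem.List.mem_pyRange_one.mp hx
        simp only [Bool.and_eq_true, decide_eq_true_eq, not_and]
        intro _; omega
      have hR : pvRL seq j = [] := by
        rw [pvRL, List.filter_eq_nil_iff]
        intro x hx
        have := PySem.List.mem_pyRange_one.mp hx
        simp only [Bool.and_eq_true, decide_eq_true_eq, not_and]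
        intro _; omega
      simp [hF, hR]

-- the characterisation of A's combined list as B's concatenation
theorem pv_main (pF pR : Int → Bool) (g : Int → Int) (l : List Int)
    (hl : l.Pairwise (· < ·)) (hnn : ∀ x ∈ l, 0 ≤ x)
    (hg : ∀ i, 0 ≤ i → g i < 0) (hgmono : ∀ i j : Int, i < j → g j < g i) :
    PySem.List.sorted (PySem.Set.ofList
        (l.filter pF ++ (l.filter pR).map g)) (fun x => x)
    = ((l.filter pR).map g).reverse ++ l.filter pF := by
  set F := l.filter pF with hF
  set R := (l.filter pR).map g with hR
  have hFl : ∀ x ∈ F, x ∈ l := by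
    intro x hx; exact List.mem_of_mem_filter hx
  have hRneg : ∀ x ∈ R, x < 0 := by
    intro x hx
    simp only [hR, List.mem_map] at hx
    obtain ⟨i, hi, rfl⟩ := hx
    exact hg i (hnn i (List.mem_of_mem_filter hi))
  have hFpw : F.Pairwise (· < ·) := hl.filter pF
  have hRpw : R.Pairwise (fun a b => b < a) := by
    rw [hR, List.pairwise_map]
    exact (hl.filter pR).imp (fun h => hgmono _ _ h)
  have hnodup : (F ++ R).Nodup := by
    refine List.nodup_append.mpr ⟨hFpw.nodup, ?_, ?_⟩
    · exact hRpw.nodup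
    · intro x hx y hy
      have h1 := hnn x (hFl x hx)
      have h2 := hRneg y hy
      omega
  have hperm : (R.reverse ++ F).Perm (F ++ R) :=
    ((R.reverse_perm).append (List.Perm.refl F)).trans List.perm_append_comm
  have hpw : (R.reverse ++ F).Pairwise (· < ·) := by
    refine List.pairwise_append.mpr ⟨List.pairwise_reverse.mpr hRpw, hFpw, ?_⟩
    intro x hx y hy
    have h1 := hRneg x (List.mem_reverse.mp hx)
    have h2 := hnn y (hFl y hy)
    omega
  rw [PySem.Set.ofList_eq_self_of_nodup _ hnodup]
  exact PySem.List.sorted_eq_of_perm_of_pairwise_lt _ _ _ hperm hpw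

-- ===== VERDICT (by name: the statement is the Claim_ definition above) =====
set_option maxHeartbeats 800000 in
theorem find_pam_sites_spec : Claim_equal_find_pam_sites := by
  intro sequence _
  unfold Spec_find_pam_sites find_pam_sites find_pam_sites_alt
  dsimp only
  rw [PySem.List.foldl_append_if, PySem.List.foldl_append_if]
  simp only [List.nil_append, List.map_id']
  rw [pv_pvRuns_spec ((PySem.Str.upper sequence).toList.length) _ 0 [] [] (by omega)]
  simp only [List.nil_append]
  set seq := (PySem.Str.upper sequence).toList with hs
  have hF0 : pvF seq 0 = (PySem.List.pyRange 0 ((seq.length : Int) - 2)).filter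
      (fun i => PySem.List.pyGetD seq (i+1) ' ' == 'G' && PySem.List.pyGetD seq (i+2) ' ' == 'G') := by
    refine List.filter_congr ?_
    intro x hx
    have := PySem.List.mem_pyRange_one.mp hx
    simp [pvPF, show (0:Int) ≤ x + 1 by omega]
  have hR0 : pvRL seq 0 = (PySem.List.pyRange 0 ((seq.length : Int) - 2)).filter
      (fun i => PySem.List.pyGetD seq i ' ' == 'C' && PySem.List.pyGetD seq (i+1) ' ' == 'C') := by
    refine List.filter_congr ?_
    intro x hx
    have := PySem.List.mem_pyRange_one.mp hx
    simp [pvPR, show (0:Int) ≤ x by omega]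
  rw [hF0, hR0]
  exact pv_main _ _ (fun i => -(i+2)) _
    (PySem.List.pairwise_lt_pyRange_one 0 _)
    (fun x hx => (PySem.List.mem_pyRange_one.mp hx).1)
    (fun i hi => by show -(i+2) < 0; omega) (fun i j h => by show -(j+2) < -(i+2); omega)
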